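-- pv_equiv track=rewrite | github.com/Diogenes08/quillan | quillan/ingest.py | _build_dep_map
-- ===== SOURCE A (Python) =====
-- def _build_dep_map(chapters_with_beats: list[dict]) -> dict:
--     """Build a simple linear dependency map: each beat depends on the previous."""
--     deps: dict[str, list[str]] = {}
--     prev: str | None = None
--     for ch_num, ch in enumerate(chapters_with_beats, 1):
--         for b_num in range(1, len(ch["beats"]) + 1):
--             beat_id = f"C{ch_num}-S1-B{b_num}"
--             deps[beat_id] = [prev] if prev else []
--             prev = beat_id
--     return {"dependencies": deps}
-- ===== SOURCE B (Python) =====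
-- def _build_dep_map(chapters_with_beats: list[dict]) -> dict:
--     """Build a simple linear dependency map: each beat depends on the previous."""
--     counts = [len(ch["beats"]) for ch in chapters_with_beats]
--
--     def pred(c, b):
--         """Predecessor position of beat b of chapter c, from the counts table alone:
--         the previous beat of the same chapter, else the last beat of the nearest
--         earlier non-empty chapter, else None."""
--         if b > 1:
--             return (c, b - 1)
--         for j in range(c - 1, 0, -1):
--             if counts[j - 1] > 0:
--                 return (j, counts[j - 1])
--         return None
--
--     deps = {}
--     for c in range(1, len(counts) + 1):
--         for b in range(1, counts[c - 1] + 1):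
--             p = pred(c, b)
--             deps[f"C{c}-S1-B{b}"] = [f"C{p[0]}-S1-B{p[1]}"] if p else []
--     return {"dependencies": deps}
-- ===== Notes on version B (the rewrite author's own statement) =====
-- stated objective: alternative
-- what changed: B first tabulates the beat count of every chapter and then computes each beat's dependency independently, by a per-beat predecessor function that searches the counts table backwards for the nearest earlier non-empty chapter, instead of A's single pass threading a mutable `prev` accumulator through nested loops.
import Mathlib
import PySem

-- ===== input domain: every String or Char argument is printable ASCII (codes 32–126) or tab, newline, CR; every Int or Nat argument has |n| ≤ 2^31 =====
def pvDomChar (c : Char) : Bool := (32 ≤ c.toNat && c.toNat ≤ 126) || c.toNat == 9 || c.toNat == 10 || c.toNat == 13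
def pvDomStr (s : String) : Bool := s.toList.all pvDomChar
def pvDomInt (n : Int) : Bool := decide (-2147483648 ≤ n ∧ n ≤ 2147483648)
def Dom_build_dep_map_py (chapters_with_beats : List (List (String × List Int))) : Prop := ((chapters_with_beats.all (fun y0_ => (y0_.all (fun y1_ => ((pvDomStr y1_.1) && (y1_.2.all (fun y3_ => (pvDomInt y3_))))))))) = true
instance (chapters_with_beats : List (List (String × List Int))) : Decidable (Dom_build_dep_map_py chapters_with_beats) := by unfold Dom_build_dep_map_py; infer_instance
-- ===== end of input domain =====

-- B replaces A's single pass threading a mutable `prev` accumulator by a counts table plus a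
-- per-beat predecessor function that searches the table backwards (alternative decomposition).

-- the f-string f"C{c}-S1-B{b}"
def pvBeatId (c b : Int) : String := "C" ++ PySem.Int.toStr c ++ "-S1-B" ++ PySem.Int.toStr b

-- ===== PORT A =====
-- literal port of A: nested loops over enumerate(chapters, 1) and range(1, len+1), threading
-- (deps dict, prev) through the loops; `ch["beats"]` is a first-match lookup (KeyError excluded by Pre_).
def build_dep_map_py (chapters_with_beats : List (List (String × List Int))) : List (String × List (String × List String)) :=
  let st :=
    (PySem.List.enumerate chapters_with_beats 1).foldl
      (fun (st : PySem.Dict String (List String) × Option String) ch =>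
        (PySem.List.pyRange 1 ((((ch.2.lookup "beats").getD []).length : Int) + 1) 1).foldl
          (fun st2 b_num =>
            let beat_id := pvBeatId ch.1 b_num
            (st2.1.insert beat_id (match st2.2 with
              | none => []
              | some p => if p = "" then [] else [p]),   -- `[prev] if prev else []`
             some beat_id))
          st)
      (PySem.Dict.empty, none)
  [("dependencies", st.1.items)]

-- ===== PORT B =====
-- Source B's inner `for j in range(c-1, 0, -1): if counts[j-1] > 0: return (j, counts[j-1])` loop;
-- counts[j-1] is always in range at B's call sites (1 ≤ j ≤ c-1 ≤ len(counts)), so pyGetD is exact there.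
def pvAltSearch (counts : List Int) : List Int → Option (Int × Int)
  | [] => none
  | j :: t =>
      if PySem.List.pyGetD counts (j - 1) 0 > 0
      then some (j, PySem.List.pyGetD counts (j - 1) 0)
      else pvAltSearch counts t

-- Source B's `pred(c, b)`
def pvAltPred (counts : List Int) (c b : Int) : Option (Int × Int) :=
  if b > 1 then some (c, b - 1)
  else pvAltSearch counts (PySem.List.pyRange (c - 1) 0 (-1))

-- literal port of Source B: tabulate counts, then nested index loops inserting, for each beat,
-- the dependency computed by pvAltPred from the counts table alone.
def build_dep_map_py_alt (chapters_with_beats : List (List (String × List Int))) : List (String × List (String × List String)) :=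
  let counts := chapters_with_beats.map (fun ch => (((ch.lookup "beats").getD []).length : Int))
  let deps :=
    (PySem.List.pyRange 1 ((counts.length : Int) + 1) 1).foldl
      (fun (d : PySem.Dict String (List String)) c =>
        (PySem.List.pyRange 1 (PySem.List.pyGetD counts (c - 1) 0 + 1) 1).foldl
          (fun d2 b =>
            d2.insert (pvBeatId c b)
              (match pvAltPred counts c b with
               | none => []
               | some p => [pvBeatId p.1 p.2]))
          d)
      PySem.Dict.empty
  [("dependencies", deps.items)]

-- ===== PRECONDITION & SPEC =====
-- Pre_ excludes exactly the inputs where the Python A raises KeyError: a chapter dict without a "beats" key.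
def Pre_build_dep_map_py (chapters_with_beats : List (List (String × List Int))) : Prop :=
  (chapters_with_beats.all (fun ch => (ch.lookup "beats").isSome)) = true
instance (chapters_with_beats : List (List (String × List Int))) : Decidable (Pre_build_dep_map_py chapters_with_beats) := by unfold Pre_build_dep_map_py; infer_instance

def pvWitness_build_dep_map_py : (List (List (String × List Int))) :=
  [[("beats", [7, 8])], [("beats", [])], [("beats", [9])]]

def Spec_build_dep_map_py (chapters_with_beats : List (List (String × List Int))) (out : List (String × List (String × List String))) : Prop := out = build_dep_map_py_alt chapters_with_beats
instance (chapters_with_beats : List (List (String × List Int))) (out : List (String × List (String × List String))) : Decidable (Spec_build_dep_map_py chapters_with_beats out) := by unfold Spec_build_dep_map_py; infer_instance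

-- ===== CLAIM (what is proved, stated in full; the proofs are below) =====
def Claim_equal_build_dep_map_py : Prop := ∀ (chapters_with_beats : List (List (String × List Int))), Dom_build_dep_map_py chapters_with_beats → Pre_build_dep_map_py chapters_with_beats → Spec_build_dep_map_py chapters_with_beats (build_dep_map_py chapters_with_beats)

-- ===== LEMMAS AND PROOFS =====

-- the per-chapter beat counts both reductions are phrased over
def pvCounts (cs : List (List (String × List Int))) : List Int :=
  cs.map (fun ch => (((ch.lookup "beats").getD []).length : Int))

-- the ordered list of all (chapter, beat) positions, chapter numbers counted from c
def pvPosFrom (c : Int) : List Int → List (Int × Int)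
  | [] => []
  | n :: t => (PySem.List.pyRange 1 (n + 1) 1).map (fun b => (c, b)) ++ pvPosFrom (c + 1) t

-- one step of A's loop body, applied to the already-formatted id
def pvStepA (st : PySem.Dict String (List String) × Option String) (x : String) :
    PySem.Dict String (List String) × Option String :=
  (st.1.insert x (match st.2 with
    | none => []
    | some p => if p = "" then [] else [p]), some x)

-- pair every id with its predecessor (A's threaded-prev chain, on strings)
def pvChain : Option String → List String → List (String × List String)
  | _, [] => []
  | p, x :: xs => (x, p.toList) :: pvChain (some x) xs

-- the same chain on positions
def pvPChain : Option (Int × Int) → List (Int × Int) → List ((Int × Int) × Option (Int × Int))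
  | _, [] => []
  | p, x :: xs => (x, p) :: pvPChain (some x) xs

theorem pv_digitChar_inj (d e : Nat) (hd : d < 10) (he : e < 10)
    (h : Nat.digitChar d = Nat.digitChar e) : d = e := by
  interval_cases d <;> interval_cases e <;> revert h <;> decide

theorem pv_toDigits_inj (n m : Nat) (h : Nat.toDigits 10 n = Nat.toDigits 10 m) : n = m := by
  induction n using Nat.strong_induction_on generalizing m with
  | _ n ih =>
    by_cases hn : n < 10 <;> by_cases hm : m < 10
    · rw [Nat.toDigits_of_lt_base hn, Nat.toDigits_of_lt_base hm] at h
      exact pv_digitChar_inj n m hn hm (by simpa using h)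
    · rw [Nat.toDigits_of_lt_base hn, Nat.toDigits_of_base_le (by norm_num) (by omega)] at h
      have hlen := congrArg List.length h
      simp only [List.length_cons, List.length_append, List.length_nil] at hlen
      have := Nat.length_toDigits_pos (b := 10) (n := m / 10)
      omega
    · rw [Nat.toDigits_of_base_le (by norm_num) (by omega), Nat.toDigits_of_lt_base hm] at h
      have hlen := congrArg List.length h
      simp only [List.length_cons, List.length_append, List.length_nil] at hlen
      have := Nat.length_toDigits_pos (b := 10) (n := n / 10)
      omega
    · rw [Nat.toDigits_of_base_le (b := 10) (n := n) (by norm_num) (by omega)] at h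
      rw [Nat.toDigits_of_base_le (b := 10) (n := m) (by norm_num) (by omega)] at h
      obtain ⟨h1, h2⟩ := List.append_inj' h rfl
      have hd : n % 10 = m % 10 :=
        pv_digitChar_inj _ _ (Nat.mod_lt _ (by norm_num)) (Nat.mod_lt _ (by norm_num))
          (by simpa using h2)
      have hq : n / 10 = m / 10 := ih (n / 10) (by omega) (m / 10) h1
      omega

theorem pv_no_dash_toDigits (n : Nat) : '-' ∉ Nat.toDigits 10 n := by
  intro hm
  have := Nat.isDigit_of_mem_toDigits (by norm_num) (by norm_num) hm
  simp [Char.isDigit] at this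

theorem pv_split_dash (u v : List Char) : ∀ (xs ys : List Char), '-' ∉ xs → '-' ∉ ys →
    xs ++ '-' :: u = ys ++ '-' :: v → xs = ys ∧ u = v := by
  intro xs
  induction xs with
  | nil =>
    intro ys hx hy h
    cases ys with
    | nil => simpa using h
    | cons y ys' =>
      simp at h
      exact absurd (h.1 ▸ List.mem_cons_self) hy
  | cons x xs' ih =>
    intro ys hx hy h
    cases ys with
    | nil =>
      simp at h
      exact absurd (h.1 ▸ List.mem_cons_self) hx
    | cons y ys' =>
      simp at h
      obtain ⟨hxy, hrest⟩ := h
      have := ih ys' (fun m => hx (List.mem_cons_of_mem x m)) (fun m => hy (List.mem_cons_of_mem y m)) hrest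
      exact ⟨by simp [hxy, this.1], this.2⟩

theorem pv_toList_beatId (c b : Int) (hc : 1 ≤ c) (hb : 1 ≤ b) :
    (pvBeatId c b).toList =
      'C' :: (Nat.toDigits 10 c.toNat ++ '-' :: 'S' :: '1' :: '-' :: 'B' :: Nat.toDigits 10 b.toNat) := by
  have h1 : ¬ (c < 0) := by omega
  have h2 : ¬ (b < 0) := by omega
  simp [pvBeatId, String.toList_append, PySem.Int.toList_toStr, PySem.Int.toChars, h1, h2]

theorem pv_beatId_ne_empty (c b : Int) (hc : 1 ≤ c) (hb : 1 ≤ b) : pvBeatId c b ≠ "" := by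
  intro h
  have := congrArg String.toList h
  rw [pv_toList_beatId c b hc hb] at this
  simp at this

theorem pv_beatId_inj (c b c' b' : Int) (hc : 1 ≤ c) (hb : 1 ≤ b) (hc' : 1 ≤ c') (hb' : 1 ≤ b')
    (h : pvBeatId c b = pvBeatId c' b') : c = c' ∧ b = b' := by
  have hl := congrArg String.toList h
  rw [pv_toList_beatId c b hc hb, pv_toList_beatId c' b' hc' hb'] at hl
  simp only [List.cons.injEq, true_and] at hl
  obtain ⟨h1, h2⟩ := pv_split_dash _ _ _ _ (pv_no_dash_toDigits _) (pv_no_dash_toDigits _) hl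
  simp only [List.cons.injEq, true_and] at h2
  have hcc : c.toNat = c'.toNat := pv_toDigits_inj _ _ h1
  have hbb : b.toNat = b'.toNat := pv_toDigits_inj _ _ h2
  omega

theorem pv_mem_posFrom (c : Int) (ns : List Int) (q : Int × Int)
    (hq : q ∈ pvPosFrom c ns) : c ≤ q.1 ∧ 1 ≤ q.2 := by
  induction ns generalizing c with
  | nil => simp [pvPosFrom] at hq
  | cons n t ih =>
    simp only [pvPosFrom, List.mem_append, List.mem_map] at hq
    rcases hq with ⟨b, hbm, rfl⟩ | hq
    · exact ⟨le_refl _, (PySem.List.mem_pyRange_one.mp hbm).1⟩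
    · have := ih (c + 1) hq
      omega

theorem pv_nodup_ids (c : Int) (hc : 1 ≤ c) (ns : List Int) :
    ((pvPosFrom c ns).map (fun q => pvBeatId q.1 q.2)).Nodup := by
  induction ns generalizing c with
  | nil => simp [pvPosFrom]
  | cons n t ih =>
    rw [pvPosFrom, List.map_append, List.nodup_append, List.map_map]
    refine ⟨?_, ih (c + 1) (by omega), ?_⟩
    · refine (PySem.List.nodup_pyRange_one 1 _).map_on ?_
      intro b hb b' hb' hE
      exact (pv_beatId_inj c b c b' hc (PySem.List.mem_pyRange_one.mp hb).1 hc
        (PySem.List.mem_pyRange_one.mp hb').1 hE).2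
    · intro x hx x' hx' hE
      subst hE
      simp only [List.mem_map, Function.comp] at hx
      obtain ⟨b, hbm, rfl⟩ := hx
      simp only [List.mem_map] at hx'
      obtain ⟨q, hqm, hq⟩ := hx'
      obtain ⟨h1, h2⟩ := pv_mem_posFrom (c + 1) t q hqm
      have := pv_beatId_inj c b q.1 q.2 hc (PySem.List.mem_pyRange_one.mp hbm).1 (by omega) h2 hq.symm
      omega

-- the generic fold of A's step over a fresh, duplicate-free, nonempty-string id list appends pvChain
theorem pv_foldA_chain (ids : List String) (d : PySem.Dict String (List String)) (p : Option String)
    (hnd : ids.Nodup) (hfresh : ∀ x ∈ ids, d.contains x = false)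
    (hne : ∀ x ∈ ids, x ≠ "") (hp : p = none ∨ ∃ s, p = some s ∧ s ≠ "") :
    (ids.foldl pvStepA (d, p)).1.items = d.items ++ pvChain p ids := by
  induction ids generalizing d p with
  | nil => simp [pvChain]
  | cons x xs ih =>
    have hstep : pvStepA (d, p) x = (d.insert x p.toList, some x) := by
      rcases hp with rfl | ⟨s, rfl, hs⟩ <;> simp [pvStepA, Option.toList, *]
    rw [List.foldl_cons, hstep]
    have hitems : (d.insert x p.toList).items = d.items ++ [(x, p.toList)] :=
      PySem.Dict.items_insert_of_not_contains d _ (hfresh x List.mem_cons_self)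
    rw [ih (d.insert x p.toList) (some x) (List.Nodup.of_cons hnd)
      (fun y hy => by
        rw [PySem.Dict.contains_insert]
        have hyx : y ≠ x := by
          intro h; subst h; exact (List.nodup_cons.mp hnd).1 hy
        simp [hyx, hfresh y (List.mem_cons_of_mem _ hy)])
      (fun y hy => hne y (List.mem_cons_of_mem _ hy))
      (Or.inr ⟨x, rfl, hne x List.mem_cons_self⟩), hitems, pvChain]
    simp

-- A's nested fold is the fold of pvStepA over the flat id list
theorem pv_A_fold (cs : List (List (String × List Int))) (c : Int)
    (st : PySem.Dict String (List String) × Option String) :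
    (PySem.List.enumerate cs c).foldl
      (fun st2 ch =>
        (PySem.List.pyRange 1 ((((ch.2.lookup "beats").getD []).length : Int) + 1) 1).foldl
          (fun st3 b => pvStepA st3 (pvBeatId ch.1 b)) st2) st
      = ((pvPosFrom c (pvCounts cs)).map (fun q => pvBeatId q.1 q.2)).foldl pvStepA st := by
  induction cs generalizing c st with
  | nil => simp [pvPosFrom, pvCounts, PySem.List.enumerate_nil]
  | cons ch t ih =>
    rw [PySem.List.enumerate_cons, List.foldl_cons, pvCounts, List.map_cons, pvPosFrom,
      List.map_append, List.foldl_append, List.map_map,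
      ← List.foldl_map (f := fun b => pvBeatId c b) (g := pvStepA)]
    exact ih (c + 1) _

-- string chain of mapped ids = mapped position chain
theorem pv_chain_map (xs : List (Int × Int)) (p : Option (Int × Int)) :
    pvChain (p.map (fun q => pvBeatId q.1 q.2)) (xs.map (fun q => pvBeatId q.1 q.2))
      = (pvPChain p xs).map
          (fun y => (pvBeatId y.1.1 y.1.2, ((y.2.map (fun q => pvBeatId q.1 q.2)).toList))) := by
  induction xs generalizing p with
  | nil => simp [pvChain, pvPChain]
  | cons x t ih =>
    have h := ih (some x)
    simp only [Option.map_some] at h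
    simp [pvChain, pvPChain, h]

theorem pv_pchain_append (xs ys : List (Int × Int)) (p : Option (Int × Int)) :
    pvPChain p (xs ++ ys) = pvPChain p xs ++ pvPChain (xs.getLast?.or p) ys := by
  induction xs generalizing p with
  | nil => simp [pvPChain]
  | cons x t ih =>
    rw [List.cons_append, pvPChain, ih (some x), pvPChain, List.cons_append]
    congr 2
    cases t with
    | nil => simp
    | cons y u =>
      obtain ⟨z, hz⟩ := Option.isSome_iff_exists.mp
        (List.getLast?_isSome.mpr (List.cons_ne_nil y u))
      simp [hz]

theorem pv_pchain_chapter (c : Int) (m : Nat) : ∀ (a : Int) (p : Option (Int × Int)),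
    pvPChain p ((PySem.List.pyRange a (a + m) 1).map (fun b => (c, b)))
      = (PySem.List.pyRange a (a + m) 1).map
          (fun b => ((c, b), if b > a then some (c, b - 1) else p)) := by
  induction m with
  | zero => simp [PySem.List.pyRange_one_eq_nil, pvPChain]
  | succ m ih =>
    intro a p
    rw [PySem.List.pyRange_one_cons (by omega)]
    have hra : a + 1 + (m : Int) = a + (m + 1 : Nat) := by push_cast; ring
    rw [List.map_cons, pvPChain, List.map_cons, if_neg (by omega)]
    have := ih (a + 1) (some (c, a))
    rw [hra] at this
    rw [this]
    congr 1
    apply List.map_congr_left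
    intro b hb
    have hab : a + 1 ≤ b := (PySem.List.mem_pyRange_one.mp hb).1
    by_cases h1 : b > a + 1
    · rw [if_pos h1, if_pos (by omega)]
    · have : b = a + 1 := by omega
      subst this
      rw [if_neg h1, if_pos (by omega)]
      simp

theorem pv_search_zero (ns : List Int) :
    pvAltSearch ns (PySem.List.pyRange 0 0 (-1)) = none := by
  rw [PySem.List.pyRange_neg_one_eq_nil (le_refl 0)]
  rfl

theorem pv_search_succ (ns : List Int) (k : Nat) (hk : k < ns.length) :
    pvAltSearch ns (PySem.List.pyRange ((k : Int) + 1) 0 (-1))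
      = if ns[k] > 0 then some ((k : Int) + 1, ns[k])
        else pvAltSearch ns (PySem.List.pyRange (k : Int) 0 (-1)) := by
  rw [PySem.List.pyRange_neg_one_cons (by omega), pvAltSearch]
  have hg : PySem.List.pyGetD ns ((k : Int) + 1 - 1) 0 = ns[k] := by
    have : ((k : Int) + 1 - 1) = (k : Int) := by ring
    rw [this, PySem.List.pyGetD_natCast, List.getD_eq_getElem?_getD, List.getElem?_eq_getElem hk]
    rfl
  rw [hg]
  have : (k : Int) + 1 - 1 = (k : Int) := by ring
  rw [this]

-- the core: from chapter k+1 on, the threaded-prev chain seeded with B's backward search at k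
-- equals the per-position predecessor map
theorem pv_main (ns : List Int) (hnn : ∀ n ∈ ns, 0 ≤ n) :
    ∀ (t : List Int) (k : Nat), ns.drop k = t → k ≤ ns.length →
    pvPChain (pvAltSearch ns (PySem.List.pyRange (k : Int) 0 (-1))) (pvPosFrom ((k : Int) + 1) t)
      = (pvPosFrom ((k : Int) + 1) t).map (fun q => (q, pvAltPred ns q.1 q.2)) := by
  intro t
  induction t with
  | nil => intro k _ _; simp [pvPosFrom, pvPChain]
  | cons n t' ih =>
    intro k hdrop hk
    have hklen : k < ns.length := by
      by_contra h
      rw [List.drop_eq_nil_of_le (by omega)] at hdrop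
      exact (List.cons_ne_nil n t') hdrop.symm
    have hnk : ns[k] = n := by
      have h0 : (ns.drop k)[0]? = some n := by rw [hdrop]; rfl
      rw [List.getElem?_drop] at h0
      simp [List.getElem?_eq_getElem hklen] at h0
      exact h0
    have hn0 : 0 ≤ n := hnk ▸ hnn _ (List.getElem_mem _)
    set c : Int := (k : Int) + 1 with hc
    set p := pvAltSearch ns (PySem.List.pyRange (k : Int) 0 (-1)) with hpdef
    rw [pvPosFrom, pv_pchain_append, List.map_append]
    have hm : n + 1 = 1 + (n.toNat : Int) := by omega
    congr 1
    · -- the chapter at hand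
      rw [hm, pv_pchain_chapter, List.map_map]
      apply List.map_congr_left
      intro b hb
      have hb1 : 1 ≤ b := (PySem.List.mem_pyRange_one.mp hb).1
      simp only [Function.comp]
      unfold pvAltPred
      by_cases h1 : b > 1
      · rw [if_pos h1, if_pos h1]
      · rw [if_neg h1, if_neg h1]
        have : c - 1 = (k : Int) := by omega
        rw [this, ← hpdef]
    · -- the remaining chapters
      have hlast : ((PySem.List.pyRange 1 (n + 1) 1).map (fun b => (c, b))).getLast?.or p
          = pvAltSearch ns (PySem.List.pyRange (c : Int) 0 (-1)) := by
        rw [hc, pv_search_succ ns k hklen, hnk]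
        by_cases hpos : n > 0
        · rw [if_pos hpos]
          rw [show n + 1 = n + 1 by rfl, PySem.List.pyRange_one_succ_right (by omega),
            List.map_append]
          simp
        · have hn : n = 0 := by omega
          rw [if_neg hpos, hn]
          simp [PySem.List.pyRange_one_eq_nil, ← hpdef]
      rw [hlast]
      have hcast : c + 1 = ((k + 1 : Nat) : Int) + 1 := by push_cast [hc]; ring
      have hdrop' : ns.drop (k + 1) = t' := by
        rw [← List.drop_drop]  -- drop 1 (drop k ns)
        rw [hdrop]
        rfl
      rw [hcast]
      exact ih (k + 1) hdrop' (by omega)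

-- A reduced: the items are the threaded chain over the flat id list
theorem pv_A_eq (cs : List (List (String × List Int))) :
    build_dep_map_py cs =
      [("dependencies",
        pvChain none ((pvPosFrom 1 (pvCounts cs)).map (fun q => pvBeatId q.1 q.2)))] := by
  calc build_dep_map_py cs
      = [("dependencies",
          ((PySem.List.enumerate cs 1).foldl
            (fun (st : PySem.Dict String (List String) × Option String) ch =>
              (PySem.List.pyRange 1 ((((ch.2.lookup "beats").getD []).length : Int) + 1) 1).foldl
                (fun st3 b => pvStepA st3 (pvBeatId ch.1 b)) st)
            (PySem.Dict.empty, none)).1.items)] := rfl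
    _ = _ := by
        rw [pv_A_fold cs 1 (PySem.Dict.empty, none)]
        rw [pv_foldA_chain _ PySem.Dict.empty none
          (pv_nodup_ids 1 (le_refl 1) (pvCounts cs))
          (fun x _ => PySem.Dict.contains_empty x)
          (fun x hx => by
            simp only [List.mem_map] at hx
            obtain ⟨q, hqm, rfl⟩ := hx
            obtain ⟨h1, h2⟩ := pv_mem_posFrom 1 (pvCounts cs) q hqm
            exact pv_beatId_ne_empty q.1 q.2 (by omega) h2)
          (Or.inl rfl)]
        rfl

-- B reduced: the nested index loops insert over the flat position list
theorem pv_B_fold (ns : List Int) (val : Int → Int → List String) :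
    ∀ (t : List Int) (k : Nat) (d : PySem.Dict String (List String)), ns.drop k = t → k ≤ ns.length →
    (PySem.List.pyRange ((k : Int) + 1) ((ns.length : Int) + 1) 1).foldl
      (fun d2 c =>
        (PySem.List.pyRange 1 (PySem.List.pyGetD ns (c - 1) 0 + 1) 1).foldl
          (fun d3 b => d3.insert (pvBeatId c b) (val c b)) d2) d
      = (pvPosFrom ((k : Int) + 1) t).foldl
          (fun d2 q => d2.insert (pvBeatId q.1 q.2) (val q.1 q.2)) d := by
  intro t
  induction t with
  | nil =>
    intro k d hdrop hk
    have hlen : ns.length ≤ k := by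
      have := congrArg List.length hdrop
      simp [List.length_drop] at this
      omega
    rw [PySem.List.pyRange_one_eq_nil (by omega)]
    simp [pvPosFrom]
  | cons n t' ih =>
    intro k d hdrop hk
    have hklen : k < ns.length := by
      by_contra h
      rw [List.drop_eq_nil_of_le (by omega)] at hdrop
      exact (List.cons_ne_nil n t') hdrop.symm
    have hnk : ns[k] = n := by
      have h0 : (ns.drop k)[0]? = some n := by rw [hdrop]; rfl
      rw [List.getElem?_drop] at h0
      simp [List.getElem?_eq_getElem hklen] at h0
      exact h0
    rw [PySem.List.pyRange_one_cons (by omega), List.foldl_cons]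
    have hg : PySem.List.pyGetD ns ((k : Int) + 1 - 1) 0 = n := by
      have he : (k : Int) + 1 - 1 = (k : Int) := by ring
      rw [he, PySem.List.pyGetD_natCast, List.getD_eq_getElem?_getD,
        List.getElem?_eq_getElem hklen, hnk]
      rfl
    rw [hg, pvPosFrom, List.foldl_append]
    have hchap : ∀ d0 : PySem.Dict String (List String),
        (PySem.List.pyRange 1 (n + 1) 1).foldl
          (fun d3 b => d3.insert (pvBeatId ((k : Int) + 1) b) (val ((k : Int) + 1) b)) d0
        = ((PySem.List.pyRange 1 (n + 1) 1).map (fun b => (((k : Int) + 1), b))).foldl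
            (fun d2 q => d2.insert (pvBeatId q.1 q.2) (val q.1 q.2)) d0 := by
      intro d0
      rw [List.foldl_map]
    rw [hchap d]
    have hdrop' : ns.drop (k + 1) = t' := by
      rw [← List.drop_drop, hdrop]
      rfl
    have h := ih (k + 1)
      (((PySem.List.pyRange 1 (n + 1) 1).map (fun b => (((k : Int) + 1), b))).foldl
        (fun d2 q => d2.insert (pvBeatId q.1 q.2) (val q.1 q.2)) d) hdrop' (by omega)
    have hcast : ((k + 1 : Nat) : Int) + 1 = (k : Int) + 1 + 1 := by push_cast; ring
    rw [hcast] at h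
    exact h

-- ===== VERDICT (by name: the statement is the Claim_ definition above) =====
theorem build_dep_map_py_spec : Claim_equal_build_dep_map_py := by
  intro cs _ _
  show build_dep_map_py cs = build_dep_map_py_alt cs
  have hnn : ∀ n ∈ pvCounts cs, 0 ≤ n := by
    intro n hn
    simp only [pvCounts, List.mem_map] at hn
    obtain ⟨ch, _, rfl⟩ := hn
    exact Int.natCast_nonneg _
  -- the per-beat value Source B stores
  have hval : ∀ q : Int × Int,
      (match pvAltPred (pvCounts cs) q.1 q.2 with
        | none => []
        | some p => [pvBeatId p.1 p.2])
      = ((pvAltPred (pvCounts cs) q.1 q.2).map (fun r => pvBeatId r.1 r.2)).toList := by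
    intro q
    cases pvAltPred (pvCounts cs) q.1 q.2 <;> rfl
  -- B reduced to a map over the flat position list
  have hBfold := pv_B_fold (pvCounts cs)
    (fun c b => match pvAltPred (pvCounts cs) c b with
      | none => []
      | some p => [pvBeatId p.1 p.2]) (pvCounts cs) 0 PySem.Dict.empty (by simp) (by omega)
  simp only [Nat.cast_zero, zero_add] at hBfold
  have hB : build_dep_map_py_alt cs =
      [("dependencies",
        ((pvPosFrom 1 (pvCounts cs)).foldl
          (fun d2 q => d2.insert (pvBeatId q.1 q.2)
            (match pvAltPred (pvCounts cs) q.1 q.2 with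
              | none => []
              | some p => [pvBeatId p.1 p.2])) PySem.Dict.empty).items)] := by
    calc build_dep_map_py_alt cs
        = [("dependencies",
            ((PySem.List.pyRange 1 (((pvCounts cs).length : Int) + 1) 1).foldl
              (fun d2 c =>
                (PySem.List.pyRange 1 (PySem.List.pyGetD (pvCounts cs) (c - 1) 0 + 1) 1).foldl
                  (fun d3 b => d3.insert (pvBeatId c b)
                    (match pvAltPred (pvCounts cs) c b with
                      | none => []
                      | some p => [pvBeatId p.1 p.2])) d2)
              PySem.Dict.empty).items)] := rfl
      _ = _ := by rw [hBfold]
  rw [pv_A_eq, hB]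
  -- B's insert loop over fresh distinct keys appends its pairs
  have hI := PySem.Dict.items_foldl_insert_fresh (pvPosFrom 1 (pvCounts cs))
      (fun q => pvBeatId q.1 q.2)
      (fun q => (match pvAltPred (pvCounts cs) q.1 q.2 with
        | none => []
        | some p => [pvBeatId p.1 p.2]))
      PySem.Dict.empty
      (fun q _ => PySem.Dict.contains_empty _)
      (pv_nodup_ids 1 (le_refl 1) (pvCounts cs))
  rw [hI]
  -- A's chain over the mapped ids is the mapped position chain
  have hcm := pv_chain_map (pvPosFrom 1 (pvCounts cs)) none
  simp only [Option.map_none] at hcm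
  rw [hcm]
  have hmain := pv_main (pvCounts cs) hnn (pvCounts cs) 0 (by simp) (by omega)
  simp only [Nat.cast_zero, zero_add, pv_search_zero] at hmain
  rw [hmain, List.map_map]
  show _ = [("dependencies",
    (PySem.Dict.empty (κ := String) (ν := List String)).items ++
      (pvPosFrom 1 (pvCounts cs)).map (fun q => (pvBeatId q.1 q.2,
        match pvAltPred (pvCounts cs) q.1 q.2 with
        | none => []
        | some p => [pvBeatId p.1 p.2])))]
  have hde : (PySem.Dict.empty (κ := String) (ν := List String)).items = [] := rfl
  rw [hde, List.nil_append]
  congr 1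
  congr 1
  apply List.map_congr_left
  intro q _
  simp only [Function.comp]
  rw [hval q]
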